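-- pv_equiv track=rewrite | github.com/scrawlsbenches/Opus-code-test | samples/search_engine.py | parse
-- ===== SOURCE A (Python) =====
-- from typing import Dict, List, Tuple, Set, Optional
--
-- def parse(query: str) -> Dict[str, List[str]]:
--     """Parse a query string into components.
--
--     Args:
--         query: The query string to parse
--
--     Returns:
--         Dictionary with keys:
--             - required: Terms that must appear
--             - excluded: Terms that must not appear
--             - optional: Regular search terms
--             - phrases: Exact phrase matches
--     """
--     result = {
--         'required': [],
--         'excluded': [],
--         'optional': [],
--         'phrases': []
--     }
--
--     i = 0
--     tokens = query.split()
--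
--     while i < len(tokens):
--         token = tokens[i]
--
--         if token.startswith('+'):
--             result['required'].append(token[1:].lower())
--         elif token.startswith('-'):
--             result['excluded'].append(token[1:].lower())
--         elif token.startswith('"'):
--             # Handle phrase - collect until closing quote
--             phrase_tokens = [token[1:]]
--             i += 1
--             while i < len(tokens) and not tokens[i].endswith('"'):
--                 phrase_tokens.append(tokens[i])
--                 i += 1
--             if i < len(tokens):
--                 phrase_tokens.append(tokens[i][:-1])
--             result['phrases'].append(' '.join(phrase_tokens).lower())
--         else:
--             result['optional'].append(token.lower())
--
--         i += 1
--
--     return result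
-- ===== SOURCE B (Python) =====
-- def parse(query: str):
--     # Stage 1: recursively cut out phrase segments, leaving plain tokens.
--     def extract(tokens):
--         for j, t in enumerate(tokens):
--             if t.startswith('"'):
--                 k = next((k for k in range(j + 1, len(tokens))
--                           if tokens[k].endswith('"')), None)
--                 if k is None:
--                     return tokens[:j], [' '.join([t[1:]] + tokens[j + 1:]).lower()]
--                 phrase = ' '.join([t[1:]] + tokens[j + 1:k] + [tokens[k][:-1]]).lower()
--                 rest_plain, rest_phrases = extract(tokens[k + 1:])
--                 return tokens[:j] + rest_plain, [phrase] + rest_phrases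
--         return tokens, []
--
--     plain, phrases = extract(query.split())
--     # Stage 2: classify the plain tokens with three comprehensions.
--     return {
--         'required': [t[1:].lower() for t in plain if t.startswith('+')],
--         'excluded': [t[1:].lower() for t in plain if not t.startswith('+') and t.startswith('-')],
--         'optional': [t.lower() for t in plain if not t.startswith('+') and not t.startswith('-')],
--         'phrases': phrases,
--     }
-- ===== Notes on version B (the rewrite author's own statement) =====
-- stated objective: alternative
-- what changed: Replaced A's single index-walking while-loop that classifies and appends into four buckets as it goes by a two-stage design: a recursive pass that cuts out phrase segments (scanning ahead to each closing quote) leaving the plain tokens, followed by three filter/map comprehensions that classify the plain tokens.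
import Mathlib
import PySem

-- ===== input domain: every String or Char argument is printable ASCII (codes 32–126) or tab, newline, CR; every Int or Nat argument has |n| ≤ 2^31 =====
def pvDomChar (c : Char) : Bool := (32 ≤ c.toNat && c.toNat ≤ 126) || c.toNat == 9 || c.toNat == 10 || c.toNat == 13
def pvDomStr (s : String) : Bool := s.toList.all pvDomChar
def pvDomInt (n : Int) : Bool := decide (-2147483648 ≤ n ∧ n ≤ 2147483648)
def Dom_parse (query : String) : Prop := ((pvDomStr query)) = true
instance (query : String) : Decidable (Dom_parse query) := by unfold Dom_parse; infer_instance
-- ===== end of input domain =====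

-- B replaces A's single classify-as-you-go index walk by two stages: a recursive pass
-- extracting the phrase segments, then three filter/map comprehensions over the plain
-- tokens (objective: alternative; return values are equal).

-- ===== PORT A =====
-- inner while: collect tokens until one ends with '"'; returns (phrase_tokens, remaining tokens)
def parseCollect (toks : List String) (acc : List String) : List String × List String :=
  match toks with
  | [] => (acc, [])
  | t :: rest =>
    if PySem.Str.endswith t "\"" then (acc ++ [PySem.Str.slice t none (some (-1))], rest)
    else parseCollect rest (acc ++ [t])

-- needed by parseLoop's termination proof
theorem parseCollect_len_le (toks : List String) (acc : List String) :
    (parseCollect toks acc).2.length ≤ toks.length := by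
  induction toks generalizing acc with
  | nil => simp [parseCollect]
  | cons t rest ih =>
    simp only [parseCollect]
    split
    · simp
    · exact Nat.le_trans (ih _) (Nat.le_succ _)

-- outer while over the token list (index i ↦ the suffix of tokens from i)
def parseLoop (toks : List String) (req exc opt phr : List String) :
    List (String × List String) :=
  match toks with
  | [] => [("required", req), ("excluded", exc), ("optional", opt), ("phrases", phr)]
  | t :: rest =>
    if PySem.Str.startswith t "+" then
      parseLoop rest (req ++ [PySem.Str.lower (PySem.Str.slice t (some 1) none)]) exc opt phr
    else if PySem.Str.startswith t "-" then
      parseLoop rest req (exc ++ [PySem.Str.lower (PySem.Str.slice t (some 1) none)]) opt phr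
    else if PySem.Str.startswith t "\"" then
      parseLoop (parseCollect rest [PySem.Str.slice t (some 1) none]).2 req exc opt
        (phr ++ [PySem.Str.lower (PySem.Str.join " " (parseCollect rest [PySem.Str.slice t (some 1) none]).1)])
    else
      parseLoop rest req exc (opt ++ [PySem.Str.lower t]) phr
  termination_by toks.length
  decreasing_by
  · simp
  · simp
  · exact Nat.lt_succ_of_le (parseCollect_len_le _ _)
  · simp

def parse (query : String) : List (String × List String) :=
  parseLoop (PySem.Str.split₀ query) [] [] [] []

-- ===== PORT B =====
-- the `next(k for k in range(j+1, …) if tokens[k].endswith('"'))` scan: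
-- splits the list at the first token ending with '"', if any
def findClose (toks : List String) : Option (List String × String × List String) :=
  match toks with
  | [] => none
  | t :: rest =>
    if PySem.Str.endswith t "\"" then some ([], t, rest)
    else
      match findClose rest with
      | none => none
      | some (b, c, a) => some (t :: b, c, a)

-- needed by extract's termination proof
theorem findClose_len (toks : List String) (b : List String) (c : String) (a : List String) :
    findClose toks = some (b, c, a) → a.length < toks.length := by
  induction toks generalizing b with
  | nil => simp [findClose]
  | cons t rest ih =>
    simp only [findClose]
    split
    · intro h
      cases h
      simp
    · cases hf : findClose rest with
      | none => simp
      | some r =>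
        obtain ⟨b', c', a'⟩ := r
        intro h
        cases h
        exact Nat.lt_succ_of_lt (ih _ hf)

-- stage 1: recursively cut out phrase segments, leaving the plain tokens
def extract (toks : List String) : List String × List String :=
  match toks with
  | [] => ([], [])
  | t :: rest =>
    if PySem.Str.startswith t "\"" then
      match hf : findClose rest with
      | none =>
        ([], [PySem.Str.lower (PySem.Str.join " " (PySem.Str.slice t (some 1) none :: rest))])
      | some (b, c, a) =>
        let r := extract a
        (r.1, PySem.Str.lower (PySem.Str.join " "
            (PySem.Str.slice t (some 1) none :: (b ++ [PySem.Str.slice c none (some (-1))]))) :: r.2)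
    else
      let r := extract rest
      (t :: r.1, r.2)
  termination_by toks.length
  decreasing_by
  · exact Nat.lt_succ_of_lt (findClose_len _ _ _ _ hf)
  · simp

-- stage 2: classify the plain tokens with three filter/map comprehensions
def parse_alt (query : String) : List (String × List String) :=
  let r := extract (PySem.Str.split₀ query)
  [("required", (r.1.filter (fun t => PySem.Str.startswith t "+")).map
      (fun t => PySem.Str.lower (PySem.Str.slice t (some 1) none))),
   ("excluded", (r.1.filter (fun t => !PySem.Str.startswith t "+" && PySem.Str.startswith t "-")).map
      (fun t => PySem.Str.lower (PySem.Str.slice t (some 1) none))),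
   ("optional", (r.1.filter (fun t => !PySem.Str.startswith t "+" && !PySem.Str.startswith t "-")).map
      (fun t => PySem.Str.lower t)),
   ("phrases", r.2)]

-- ===== PRECONDITION & SPEC =====
def Spec_parse (query : String) (out : List (String × List String)) : Prop := out = parse_alt query
instance (query : String) (out : List (String × List String)) : Decidable (Spec_parse query out) := by unfold Spec_parse; infer_instance

-- ===== CLAIM (what is proved, stated in full; the proofs are below) =====
def Claim_equal_parse : Prop := ∀ (query : String), Dom_parse query → Spec_parse query (parse query)

-- ===== LEMMAS AND PROOFS =====

-- a single-char prefix excludes any other single-char prefix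
theorem startswith_single_ne (l : List Char) (c d : Char) (hne : c ≠ d) :
    PySem.Chars.startswith l [c] = true → PySem.Chars.startswith l [d] = false := by
  cases l with
  | nil => simp [PySem.Chars.startswith, List.isPrefixOf]
  | cons x xs =>
    simp [PySem.Chars.startswith, List.isPrefixOf]
    rintro rfl
    exact fun h => absurd h.symm hne

-- a token starting with '+' or '-' does not start with '"'
theorem startswith_plus_not_quote (t : String) :
    PySem.Str.startswith t "+" = true → PySem.Str.startswith t "\"" = false := by
  simpa using startswith_single_ne t.toList '+' '\"' (by decide)

theorem startswith_minus_not_quote (t : String) :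
    PySem.Str.startswith t "-" = true → PySem.Str.startswith t "\"" = false := by
  simpa using startswith_single_ne t.toList '-' '\"' (by decide)

-- A's inner collection loop, characterised via findClose
theorem parseCollect_eq_findClose (toks : List String) (acc : List String) :
    parseCollect toks acc =
      match findClose toks with
      | none => (acc ++ toks, [])
      | some (b, c, a) => (acc ++ (b ++ [PySem.Str.slice c none (some (-1))]), a) := by
  induction toks generalizing acc with
  | nil => simp [parseCollect, findClose]
  | cons t rest ih =>
    simp only [parseCollect, findClose]
    split
    · simp
    · rw [ih]
      cases hf : findClose rest with
      | none => simp
      | some r => obtain ⟨b, c, a⟩ := r; simp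

-- main invariant: A's walk equals stage-1 extraction followed by the classifications
theorem loop_eq_extract (n : Nat) : ∀ (toks : List String), toks.length ≤ n →
    ∀ (req exc opt phr : List String),
    parseLoop toks req exc opt phr =
      [("required", req ++ ((extract toks).1.filter (fun t => PySem.Str.startswith t "+")).map
          (fun t => PySem.Str.lower (PySem.Str.slice t (some 1) none))),
       ("excluded", exc ++ ((extract toks).1.filter
            (fun t => !PySem.Str.startswith t "+" && PySem.Str.startswith t "-")).map
          (fun t => PySem.Str.lower (PySem.Str.slice t (some 1) none))),
       ("optional", opt ++ ((extract toks).1.filter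
            (fun t => !PySem.Str.startswith t "+" && !PySem.Str.startswith t "-")).map
          (fun t => PySem.Str.lower t)),
       ("phrases", phr ++ (extract toks).2)] := by
  induction n with
  | zero =>
    intro toks h
    rw [List.length_eq_zero_iff.mp (Nat.le_zero.mp h)]
    intro req exc opt phr
    simp [parseLoop, extract]
  | succ n ih =>
    intro toks h req exc opt phr
    match toks with
    | [] => simp [parseLoop, extract]
    | t :: rest =>
      rw [parseLoop]
      by_cases hp : PySem.Str.startswith t "+" = true
      · rw [if_pos hp, ih rest (by simpa using h)]
        rw [extract, if_neg (by simp only [Bool.not_eq_true]; exact startswith_plus_not_quote t hp)]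
        have hp' : PySem.Chars.startswith t.toList ['+'] = true := by simpa using hp
        simp [hp']
      · rw [if_neg hp]
        have hp' : PySem.Chars.startswith t.toList ['+'] = false := by
          simpa using Bool.of_not_eq_true hp
        by_cases hm : PySem.Str.startswith t "-" = true
        · rw [if_pos hm, ih rest (by simpa using h)]
          rw [extract, if_neg (by simp only [Bool.not_eq_true]; exact startswith_minus_not_quote t hm)]
          have hm' : PySem.Chars.startswith t.toList ['-'] = true := by simpa using hm
          simp [hp', hm']
        · rw [if_neg hm]
          have hm' : PySem.Chars.startswith t.toList ['-'] = false := by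
            simpa using Bool.of_not_eq_true hm
          by_cases hq : PySem.Str.startswith t "\"" = true
          · rw [if_pos hq]
            rw [extract, if_pos hq]
            rw [parseCollect_eq_findClose]
            cases hf : findClose rest with
            | none =>
              rw [parseLoop]
              simp
            | some r =>
              obtain ⟨b, c, a⟩ := r
              rw [ih a (by
                have := findClose_len rest b c a hf
                simp at h
                omega)]
              simp
          · rw [if_neg hq, ih rest (by simpa using h)]
            rw [extract, if_neg hq]
            simp [hp', hm']

-- ===== VERDICT (by name: the statement is the Claim_ definition above) =====
theorem parse_spec : Claim_equal_parse := by
  intro query _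
  unfold Spec_parse parse parse_alt
  rw [loop_eq_extract (PySem.Str.split₀ query).length _ (le_refl _)]
  simp
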